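-- pv_equiv track=rewrite | github.com/JilanyRayhan/Learn-Python-Basic | program to merge two sorted array.py | merge_ar
-- ===== SOURCE A (Python) =====
-- def merge_ar(ar1,ar2):
--   ar1.extend(ar2)
--   mer = []
--   for element in ar1:
--     if element not in mer:
--       mer.append(element)
--   mer.sort()
--
--   return mer
-- ===== SOURCE B (Python) =====
-- def merge_ar(ar1, ar2):
--     ar1.extend(ar2)
--     s = sorted(ar1)
--     mer = []
--     for it in s:
--         if not mer or mer[-1] != it:
--             mer.append(it)
--     return mer
-- ===== Notes on version B (the rewrite author's own statement) =====
-- stated objective: faster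
-- what changed: Replaced the quadratic dedup-via-list-membership-then-sort with sort-first followed by a single linear adjacent-deduplication pass.
import Mathlib
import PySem

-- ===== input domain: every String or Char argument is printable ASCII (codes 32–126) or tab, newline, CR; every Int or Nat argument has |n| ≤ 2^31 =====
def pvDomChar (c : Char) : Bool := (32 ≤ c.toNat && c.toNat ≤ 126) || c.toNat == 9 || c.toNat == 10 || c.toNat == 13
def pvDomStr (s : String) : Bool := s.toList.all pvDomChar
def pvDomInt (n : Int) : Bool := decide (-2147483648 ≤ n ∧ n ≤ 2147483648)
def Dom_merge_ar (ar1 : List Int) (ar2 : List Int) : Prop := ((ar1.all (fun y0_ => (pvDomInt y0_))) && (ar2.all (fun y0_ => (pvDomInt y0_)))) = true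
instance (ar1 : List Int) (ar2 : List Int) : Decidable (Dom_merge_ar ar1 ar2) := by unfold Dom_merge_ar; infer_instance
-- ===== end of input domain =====

-- B replaces A's quadratic membership-test dedup followed by a sort with sort-first then one
-- linear adjacent-dedup pass (objective: faster). Like A, B mutates ar1 in place by extending
-- it with ar2 (and never sorts ar1 in place); the equivalence proved here is about the return value.

-- ===== PORT A =====
def merge_ar (ar1 : List Int) (ar2 : List Int) : List Int :=
  let ar1 := ar1 ++ ar2
  let mer := ar1.foldl (fun mer element => if element ∉ mer then mer ++ [element] else mer) []
  PySem.List.sorted mer (fun x => x) false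

-- ===== PORT B =====
def merge_ar_alt (ar1 : List Int) (ar2 : List Int) : List Int :=
  let ar1 := ar1 ++ ar2
  let s := PySem.List.sorted ar1 (fun x => x) false
  s.foldl (fun mer it => if mer = [] ∨ PySem.List.pyGet? mer (-1) ≠ some it then mer ++ [it] else mer) []

-- ===== PRECONDITION & SPEC =====
def Spec_merge_ar (ar1 : List Int) (ar2 : List Int) (out : List Int) : Prop := out = merge_ar_alt ar1 ar2
instance (ar1 : List Int) (ar2 : List Int) (out : List Int) : Decidable (Spec_merge_ar ar1 ar2 out) := by unfold Spec_merge_ar; infer_instance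

-- ===== CLAIM (what is proved, stated in full; the proofs are below) =====
def Claim_equal_merge_ar : Prop := ∀ (ar1 : List Int) (ar2 : List Int), Dom_merge_ar ar1 ar2 → Spec_merge_ar ar1 ar2 (merge_ar ar1 ar2)

-- ===== LEMMAS AND PROOFS =====
-- fA / fB name the loop bodies of the two ports (identical lambdas), so the lemmas can speak about them.
def fA : List Int → Int → List Int := fun mer element => if element ∉ mer then mer ++ [element] else mer
def fB : List Int → Int → List Int := fun mer it => if mer = [] ∨ PySem.List.pyGet? mer (-1) ≠ some it then mer ++ [it] else mer

theorem pyGet_neg_one (l : List Int) : PySem.List.pyGet? l (-1) = l.getLast? := by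
  simp [PySem.List.pyGet?, PySem.List.pyIdx?]
  rcases l.eq_nil_or_concat with rfl | ⟨t, x, rfl⟩ <;> simp

theorem memA (xs : List Int) (acc : List Int) (x : Int) :
    x ∈ xs.foldl fA acc ↔ x ∈ acc ∨ x ∈ xs := by
  induction xs generalizing acc with
  | nil => simp
  | cons a t ih =>
    simp only [List.foldl_cons, fA]
    split_ifs with hm <;>
      simp only [ih, List.mem_append, List.mem_cons] <;>
      constructor
    · rintro (h | h) <;> tauto
    · rintro (h | rfl | h) <;> tauto
    · rintro (h | h) <;> tauto
    · rintro (h | rfl | h) <;> tauto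

theorem nodupA (xs : List Int) (acc : List Int) (h : acc.Nodup) :
    (xs.foldl fA acc).Nodup := by
  induction xs generalizing acc with
  | nil => simpa
  | cons a t ih =>
    simp only [List.foldl_cons, fA]
    split_ifs with hm
    · exact ih _ h
    · refine ih _ ?_
      simp only [List.nodup_append, List.nodup_singleton, true_and, h]
      intro b hb c hc
      simp only [List.mem_singleton] at hc
      subst hc
      exact fun hba => hm (hba ▸ hb)

theorem memB (s : List Int) (acc : List Int) (x : Int) :
    x ∈ s.foldl fB acc ↔ x ∈ acc ∨ x ∈ s := by
  induction s generalizing acc with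
  | nil => simp
  | cons a t ih =>
    simp only [List.foldl_cons, fB]
    split_ifs with hm
    · simp only [ih, List.mem_append, List.mem_cons]; tauto
    · rw [not_or, not_ne_iff] at hm
      obtain ⟨hne, hl⟩ := hm
      have ha : a ∈ acc := by
        rw [pyGet_neg_one] at hl
        exact List.mem_of_getLast? hl
      simp only [ih, List.mem_cons]
      constructor
      · tauto
      · rintro (h | rfl | h) <;> tauto

theorem le_getLast_of_pairwise_lt (acc : List Int) (a l : Int)
    (hp : acc.Pairwise (· < ·)) (ha : a ∈ acc) (hl : acc.getLast? = some l) : a ≤ l := by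
  rcases List.eq_nil_or_concat acc with rfl | ⟨u, z, rfl⟩
  · simp at ha
  · simp only [List.concat_eq_append] at hp ha hl
    rw [List.getLast?_concat] at hl
    obtain rfl : l = z := by simpa using hl.symm
    rcases List.mem_append.1 ha with h | h
    · exact le_of_lt ((List.pairwise_append.1 hp).2.2 a h l (by simp))
    · simp at h; omega

theorem pairB (s : List Int) (acc : List Int)
    (hs : s.Pairwise (· ≤ ·)) (hacc : acc.Pairwise (· < ·))
    (hle : ∀ y ∈ s, ∀ a ∈ acc, a ≤ y) :
    (s.foldl fB acc).Pairwise (· < ·) := by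
  induction s generalizing acc with
  | nil => simpa
  | cons x t ih =>
    have hxle : ∀ y ∈ t, x ≤ y := (List.pairwise_cons.1 hs).1
    have hst := (List.pairwise_cons.1 hs).2
    simp only [List.foldl_cons, fB]
    split_ifs with hm
    · apply ih _ hst
      · rw [List.pairwise_append]
        refine ⟨hacc, by simp, ?_⟩
        intro a ha y hy
        have hy' : y = x := by simpa using hy
        have hax : a ≤ x := hle x (by simp) a ha
        have hne : a ≠ x := by
          intro rfl
          rcases hm with hnil | hl
          · rw [hnil] at ha; simp at ha
          · rcases List.eq_nil_or_concat acc with rfl | ⟨u, z, rfl⟩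
            · simp at ha
            · simp only [List.concat_eq_append] at ha hacc hl
              rw [pyGet_neg_one, List.getLast?_concat] at hl
              have hz := le_getLast_of_pairwise_lt _ a z hacc ha (by rw [List.getLast?_concat])
              have hzx : z ≤ a := hle a (by simp) z (by simp)
              have hza : z = a := le_antisymm hzx hz
              exact hl (by rw [hza])
        omega
      · intro y hy b hb
        rcases List.mem_append.1 hb with h | h
        · exact hle y (by simp [hy]) b h
        · simp at h; subst h; exact hxle y hy
    · exact ih _ hst hacc (fun y hy a ha => hle y (by simp [hy]) a ha)

theorem eq_of_pairwise_lt_of_mem_iff (l1 l2 : List Int)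
    (h1 : l1.Pairwise (· < ·)) (h2 : l2.Pairwise (· < ·))
    (hm : ∀ x, x ∈ l1 ↔ x ∈ l2) : l1 = l2 := by
  induction l1 generalizing l2 with
  | nil =>
    cases l2 with
    | nil => rfl
    | cons b t => exact absurd ((hm b).2 (by simp)) (by simp)
  | cons a t1 ih =>
    cases l2 with
    | nil => exact absurd ((hm a).1 (by simp)) (by simp)
    | cons b t2 =>
      have hab : a = b := by
        have ha := (hm a).1 (by simp)
        have hb := (hm b).2 (by simp)
        simp at ha hb
        rcases ha with rfl | ha
        · rfl
        · rcases hb with rfl | hb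
          · rfl
          · have := (List.pairwise_cons.1 h1).1 b hb
            have := (List.pairwise_cons.1 h2).1 a ha
            omega
      subst hab
      have ht : t1 = t2 := by
        refine ih t2 (List.pairwise_cons.1 h1).2 (List.pairwise_cons.1 h2).2 ?_
        intro x
        constructor
        · intro hx
          have hne : x ≠ a := by
            have := (List.pairwise_cons.1 h1).1 x hx; omega
          have := (hm x).1 (by simp [hx])
          simpa [hne] using this
        · intro hx
          have hne : x ≠ a := by
            have := (List.pairwise_cons.1 h2).1 x hx; omega
          have := (hm x).2 (by simp [hx])
          simpa [hne] using this
      rw [ht]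

theorem pairwise_lt_of_le_nodup (l : List Int)
    (h1 : l.Pairwise (· ≤ ·)) (h2 : l.Nodup) : l.Pairwise (· < ·) :=
  (h1.and h2).imp (fun h => lt_of_le_of_ne h.1 h.2)

theorem merge_ar_main (ar1 ar2 : List Int) : merge_ar ar1 ar2 = merge_ar_alt ar1 ar2 := by
  show PySem.List.sorted ((ar1 ++ ar2).foldl fA []) (fun x => x) false
      = (PySem.List.sorted (ar1 ++ ar2) (fun x => x) false).foldl fB []
  have hnd : ((ar1 ++ ar2).foldl fA []).Nodup := nodupA _ _ (by simp)
  apply eq_of_pairwise_lt_of_mem_iff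
  · apply pairwise_lt_of_le_nodup
    · have := PySem.List.sorted_pairwise (xs := (ar1 ++ ar2).foldl fA []) (key := fun x => x)
      simpa using this
    · exact ((PySem.List.sorted_perm (xs := (ar1 ++ ar2).foldl fA []) (key := fun x => x) (rev := false)).nodup_iff).2 hnd
  · apply pairB
    · have := PySem.List.sorted_pairwise (xs := ar1 ++ ar2) (key := fun x => x)
      simpa using this
    · simp
    · simp
  · intro x
    rw [PySem.List.mem_sorted, memA, memB, PySem.List.mem_sorted]

-- ===== VERDICT (by name: the statement is the Claim_ definition above) =====
theorem merge_ar_spec : Claim_equal_merge_ar := by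
  intro ar1 ar2 _
  unfold Spec_merge_ar
  exact merge_ar_main ar1 ar2
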